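-- pv_equiv track=rewrite | github.com/Sam-2727/String-Monte-Carlo | lightcone formalism/local_channel_catalog.py | classify_profile_signature
-- ===== SOURCE A (Python) =====
-- def classify_profile_signature(
--     profiles: tuple[tuple[tuple[int, int], ...], ...],
-- ) -> str:
--     if all(not profile for profile in profiles):
--         return "vanishing"
--     if all(profile == ((0, 1),) for profile in profiles):
--         return "reduced_only"
--     if all(profile == ((2, 4),) for profile in profiles):
--         return "pure_quadratic_local"
--     if all(profile == ((4, 14),) for profile in profiles):
--         return "pure_quartic_local"
--     if all(profile == ((0, 1), (4, 14)) for profile in profiles):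
--         return "reduced_plus_quartic"
--     return "other"
-- ===== SOURCE B (Python) =====
-- _CATALOG = {
--     ((0, 1),): "reduced_only",
--     ((2, 4),): "pure_quadratic_local",
--     ((4, 14),): "pure_quartic_local",
--     ((0, 1), (4, 14)): "reduced_plus_quartic",
-- }
--
--
-- def classify_profile_signature(
--     profiles: tuple[tuple[tuple[int, int], ...], ...],
-- ) -> str:
--     distinct = set(profiles)
--     if distinct <= {()}:
--         return "vanishing"
--     if len(distinct) == 1:
--         (profile,) = distinct
--         return _CATALOG.get(profile, "other")
--     return "other"
-- ===== Notes on version B (the rewrite author's own statement) =====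
-- stated objective: simpler
-- what changed: Replaces five separate short-circuiting all() scans over the tuple by a single deduplication pass (set) followed by a subset test for the vanishing case and one dictionary lookup of the unique profile for the named cases.
import Mathlib
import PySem

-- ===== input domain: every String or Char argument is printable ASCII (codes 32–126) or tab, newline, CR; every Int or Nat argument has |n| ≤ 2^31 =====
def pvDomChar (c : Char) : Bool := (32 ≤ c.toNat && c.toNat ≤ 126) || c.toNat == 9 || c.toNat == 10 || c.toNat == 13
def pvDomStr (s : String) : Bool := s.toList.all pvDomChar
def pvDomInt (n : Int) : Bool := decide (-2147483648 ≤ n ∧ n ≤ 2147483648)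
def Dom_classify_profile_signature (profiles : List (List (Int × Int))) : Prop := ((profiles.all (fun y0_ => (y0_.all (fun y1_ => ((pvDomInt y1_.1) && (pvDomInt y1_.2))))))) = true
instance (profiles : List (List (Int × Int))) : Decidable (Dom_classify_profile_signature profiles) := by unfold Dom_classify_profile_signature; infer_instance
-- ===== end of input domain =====

-- B replaces A's five short-circuiting all() scans by one deduplication pass (set)
-- plus a subset test and a single dictionary lookup; objective: simpler.

-- ===== PORT A =====
def classify_profile_signature (profiles : List (List (Int × Int))) : String :=
  if profiles.all (fun profile => profile == ([] : List (Int × Int))) then "vanishing"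
  else if profiles.all (fun profile => profile == [((0 : Int), (1 : Int))]) then "reduced_only"
  else if profiles.all (fun profile => profile == [((2 : Int), (4 : Int))]) then "pure_quadratic_local"
  else if profiles.all (fun profile => profile == [((4 : Int), (14 : Int))]) then "pure_quartic_local"
  else if profiles.all (fun profile => profile == [((0 : Int), (1 : Int)), ((4 : Int), (14 : Int))]) then "reduced_plus_quartic"
  else "other"

-- ===== PORT B =====
-- the module-level _CATALOG dict of Source B
def pvCatalog : PySem.Dict (List (Int × Int)) String :=
  PySem.Dict.ofList
    [([((0 : Int), (1 : Int))], "reduced_only"),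
     ([((2 : Int), (4 : Int))], "pure_quadratic_local"),
     ([((4 : Int), (14 : Int))], "pure_quartic_local"),
     ([((0 : Int), (1 : Int)), ((4 : Int), (14 : Int))], "reduced_plus_quartic")]

-- the body of Source B after 'distinct = set(profiles)'
def pvClassifyDistinct (distinct : PySem.Set (List (Int × Int))) : String :=
  if PySem.Set.issubset distinct [([] : List (Int × Int))] then "vanishing"
  else
    match distinct with
    | [profile] => PySem.Dict.getD pvCatalog profile "other"
    | _ => "other"

def classify_profile_signature_alt (profiles : List (List (Int × Int))) : String :=
  pvClassifyDistinct (PySem.Set.ofList profiles)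

-- ===== PRECONDITION & SPEC =====
def Spec_classify_profile_signature (profiles : List (List (Int × Int))) (out : String) : Prop := out = classify_profile_signature_alt profiles
instance (profiles : List (List (Int × Int))) (out : String) : Decidable (Spec_classify_profile_signature profiles out) := by unfold Spec_classify_profile_signature; infer_instance

-- ===== CLAIM (what is proved, stated in full; the proofs are below) =====
def Claim_equal_classify_profile_signature : Prop := ∀ (profiles : List (List (Int × Int))), Dom_classify_profile_signature profiles → Spec_classify_profile_signature profiles (classify_profile_signature profiles)

-- ===== LEMMAS AND PROOFS =====

-- A's all(profile == v) test, read through the dedup set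
lemma pv_all_iff (profiles : List (List (Int × Int))) (v : List (Int × Int)) :
    (profiles.all (fun profile => profile == v) = true) ↔
      (∀ x ∈ PySem.Set.ofList profiles, x = v) := by
  simp only [List.all_eq_true, beq_iff_eq, PySem.Set.mem_ofList]

lemma pv_main (profiles : List (List (Int × Int))) :
    classify_profile_signature profiles = pvClassifyDistinct (PySem.Set.ofList profiles) := by
  have hnd : (PySem.Set.ofList profiles).Nodup := PySem.Set.nodup_ofList profiles
  have hmem : ∀ x, x ∈ PySem.Set.ofList profiles ↔ x ∈ profiles :=
    fun x => PySem.Set.mem_ofList profiles x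
  have hall := pv_all_iff profiles
  rcases hs : PySem.Set.ofList profiles with _ | ⟨x, _ | ⟨y, t⟩⟩
  · -- set empty → profiles empty → both "vanishing"
    have hempty : profiles = [] := by
      rw [List.eq_nil_iff_forall_not_mem]
      intro a ha
      have := (hmem a).mpr ha
      simp [hs] at this
    subst hempty
    rfl
  · -- exactly one distinct profile x
    have hx : x ∈ profiles := (hmem x).mp (by simp [hs])
    have hone : ∀ v, (profiles.all (fun profile => profile == v) = true) ↔ x = v := by
      intro v
      rw [hall v, hs]
      constructor
      · intro h; exact h x (by simp)
      · intro h z hz; simp at hz; rw [hz, h]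
    have hAv : ∀ v, x ≠ v → profiles.all (fun profile => profile == v) = false :=
      fun v hv => Bool.eq_false_iff.mpr (fun h => hv ((hone v).mp h))
    by_cases hxe : x = []
    · subst hxe
      unfold classify_profile_signature
      rw [(hone []).mpr rfl]
      rfl
    · have hsub : PySem.Set.issubset [x] [([] : List (Int × Int))] = false :=
        Bool.eq_false_iff.mpr (fun h => hxe (by simpa using (PySem.Set.issubset_iff [x] [[]]).mp h x (by simp)))
      have h0 := hAv [] hxe
      unfold classify_profile_signature
      rw [h0]
      by_cases h1 : x = [((0 : Int), (1 : Int))]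
      · subst h1; rw [(hone _).mpr rfl]; rfl
      · rw [hAv _ h1]
        by_cases h2 : x = [((2 : Int), (4 : Int))]
        · subst h2; rw [(hone _).mpr rfl]; rfl
        · rw [hAv _ h2]
          by_cases h3 : x = [((4 : Int), (14 : Int))]
          · subst h3; rw [(hone _).mpr rfl]; rfl
          · rw [hAv _ h3]
            by_cases h4 : x = [((0 : Int), (1 : Int)), ((4 : Int), (14 : Int))]
            · subst h4; rw [(hone _).mpr rfl]; rfl
            · rw [hAv _ h4]
              unfold pvClassifyDistinct
              rw [hsub]
              have hcm : pvCatalog = PySem.Dict.mk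
                  [([((0 : Int), (1 : Int))], "reduced_only"),
                   ([((2 : Int), (4 : Int))], "pure_quadratic_local"),
                   ([((4 : Int), (14 : Int))], "pure_quartic_local"),
                   ([((0 : Int), (1 : Int)), ((4 : Int), (14 : Int))], "reduced_plus_quartic")] := rfl
              rw [hcm]
              simp only [PySem.Dict.getD_eq_get?_getD, PySem.Dict.get?_mk_cons]
              simp [Ne.symm h1, Ne.symm h2, Ne.symm h3, Ne.symm h4, PySem.Dict.get?]
  · -- at least two distinct profiles → both "other"
    rw [hs] at hnd
    have hxy : x ≠ y := by
      intro h
      exact (List.nodup_cons.mp hnd).1 (by simp [h])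
    have hfail : ∀ v, profiles.all (fun profile => profile == v) = false := by
      intro v
      refine Bool.eq_false_iff.mpr (fun h => ?_)
      have h' := (hall v).mp h
      rw [hs] at h'
      exact hxy ((h' x (by simp)).trans (h' y (by simp)).symm)
    have hsub : PySem.Set.issubset (x :: y :: t) [([] : List (Int × Int))] = false := by
      refine Bool.eq_false_iff.mpr (fun h => ?_)
      have h' := (PySem.Set.issubset_iff (x :: y :: t) [[]]).mp h
      have h1 : x = [] := by simpa using h' x (by simp)
      have h2 : y = [] := by simpa using h' y (by simp)
      exact hxy (h1.trans h2.symm)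
    unfold classify_profile_signature pvClassifyDistinct
    rw [hfail, hfail, hfail, hfail, hfail, hsub]
    rfl

-- ===== VERDICT (by name: the statement is the Claim_ definition above) =====
theorem classify_profile_signature_spec : Claim_equal_classify_profile_signature := by
  intro profiles _
  unfold Spec_classify_profile_signature classify_profile_signature_alt
  exact pv_main profiles
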